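-- pv_equiv track=rewrite | github.com/thierryxdp/TCC | problems/835/solution_349692.py | melhor_volta
-- ===== SOURCE A (Python) =====
-- def melhor_volta(m):
--     mins = []
--     for i in m:
--         mins.append(min(i))
--     a = min(mins)
--     mr = mins.index(a) + 1
--     v = 1
--     for i in m:
--         for j in i:
--             if j == a:
--                 v = v + i.index(j)
--     return (mr, a, v)
-- ===== SOURCE B (Python) =====
-- def melhor_volta(m):
--     # One pass per row: (row min, first index of min, count of min).
--     stats = []
--     for row in m:
--         mn, idx, cnt = row[0], 0, 1
--         for k, x in enumerate(row[1:], 1):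
--             if x < mn:
--                 mn, idx, cnt = x, k, 1
--             elif x == mn:
--                 cnt += 1
--         stats.append((mn, idx, cnt))
--     a = min(mn for (mn, _, _) in stats)
--     mr, v = 0, 1
--     for i, (mn, idx, cnt) in enumerate(stats):
--         if mn == a:
--             if mr == 0:
--                 mr = i + 1
--             v += idx * cnt
--     return (mr, a, v)
-- ===== Notes on version B (the rewrite author's own statement) =====
-- stated objective: alternative
-- what changed: Instead of A's min()/index() built-in scans and an inner i.index(j) rescan per matching element, B makes a single explicit pass per row computing (min, first index of min, count of min) and one combine pass over those row summaries.
import Mathlib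
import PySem

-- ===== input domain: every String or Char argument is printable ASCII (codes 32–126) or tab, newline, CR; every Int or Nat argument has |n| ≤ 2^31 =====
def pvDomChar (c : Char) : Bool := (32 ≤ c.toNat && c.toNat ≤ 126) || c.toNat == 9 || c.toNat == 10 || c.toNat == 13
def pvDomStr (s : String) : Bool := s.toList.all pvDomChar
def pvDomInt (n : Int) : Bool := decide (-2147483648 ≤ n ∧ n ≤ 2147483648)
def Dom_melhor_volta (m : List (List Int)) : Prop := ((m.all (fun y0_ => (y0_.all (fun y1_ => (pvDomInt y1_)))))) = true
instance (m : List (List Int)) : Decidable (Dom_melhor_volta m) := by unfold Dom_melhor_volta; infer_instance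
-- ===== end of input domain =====

-- B replaces A's repeated i.index(j) rescans by a single pass per row tracking (min, first index of min, count of min) plus one combine pass; equivalence proved on nonempty matrices with nonempty rows.

-- ===== PORT A =====
def melhor_volta (m : List (List Int)) : Int × Int × Int :=
  let mins : List Int := m.foldl (fun mins i => mins ++ [(PySem.List.min? i (fun x => x)).getD 0]) []
  let a : Int := (PySem.List.min? mins (fun x => x)).getD 0
  let mr : Int := (((PySem.List.index? mins a).getD 0 : Nat) : Int) + 1
  let v : Int := m.foldl (fun v i =>
      i.foldl (fun v j => if j == a then v + (((PySem.List.index? i j).getD 0 : Nat) : Int) else v) v) 1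
  (mr, a, v)

-- ===== PORT B =====
-- inner row loop of Source B: state = ((mn, idx, cnt), k)
def pvRowStep (s : (Int × Int × Int) × Int) (x : Int) : (Int × Int × Int) × Int :=
  if x < s.1.1 then ((x, s.2, 1), s.2 + 1)
  else if x == s.1.1 then ((s.1.1, s.1.2.1, s.1.2.2 + 1), s.2 + 1)
  else (s.1, s.2 + 1)

def pvRowStat : List Int → Int × Int × Int
  | [] => (0, 0, 0)
  | x :: rest => (rest.foldl pvRowStep ((x, 0, 1), 1)).1

set_option maxRecDepth 8192 in
-- combine loop of Source B: state = ((mr, v), i)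
def pvCombStep (a : Int) (s : (Int × Int) × Int) (t : Int × Int × Int) : (Int × Int) × Int :=
  (if t.1 == a then
     ((if s.1.1 == 0 then s.2 + 1 else s.1.1), s.1.2 + t.2.1 * t.2.2)
   else s.1, s.2 + 1)

def melhor_volta_alt (m : List (List Int)) : Int × Int × Int :=
  let stats := m.foldl (fun acc row => acc ++ [pvRowStat row]) []
  let a : Int := (PySem.List.min? (stats.map Prod.fst) (fun x => x)).getD 0
  let r := stats.foldl (pvCombStep a) ((0, 1), 0)
  (r.1.1, a, r.1.2)

-- ===== PRECONDITION & SPEC =====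
-- Pre_ excludes exactly the inputs where Python A raises ValueError (min() of an empty sequence): the empty matrix or a matrix with an empty row.
def Pre_melhor_volta (m : List (List Int)) : Prop := m ≠ [] ∧ ∀ row ∈ m, row ≠ []
instance (m : List (List Int)) : Decidable (Pre_melhor_volta m) := by unfold Pre_melhor_volta; infer_instance
def pvWitness_melhor_volta : List (List Int) := [[3, 1, 2], [1, 4]]

def Spec_melhor_volta (m : List (List Int)) (out : Int × Int × Int) : Prop := out = melhor_volta_alt m
instance (m : List (List Int)) (out : Int × Int × Int) : Decidable (Spec_melhor_volta m out) := by unfold Spec_melhor_volta; infer_instance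

-- ===== CLAIM (what is proved, stated in full; the proofs are below) =====
def Claim_equal_melhor_volta : Prop := ∀ (m : List (List Int)), Dom_melhor_volta m → Pre_melhor_volta m → Spec_melhor_volta m (melhor_volta m)

-- ===== LEMMAS AND PROOFS =====
def pvBest : Int → List Int → Int × Nat × Nat
  | x, [] => (x, 0, 1)
  | x, y :: l =>
    let t := pvBest y l
    if x < t.1 then (x, 0, 1)
    else if x = t.1 then (x, 0, t.2.2 + 1)
    else (t.1, t.2.1 + 1, t.2.2)

lemma pvBest_fst_foldl : ∀ (l : List Int) (x : Int), (pvBest x l).1 = l.foldl min x := by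
  intro l
  induction l with
  | nil => intro x; rfl
  | cons y t ih =>
    intro x
    simp only [pvBest, List.foldl_cons]
    have h2 : ∀ (l : List Int) (a b : Int), l.foldl min (min a b) = min a (l.foldl min b) := by
      intro l
      induction l with
      | nil => intro a b; rfl
      | cons z l ih2 =>
        intro a b
        simp only [List.foldl_cons, min_assoc, ih2]
    rw [h2, ← ih y]
    rcases lt_trichotomy x (pvBest y t).1 with h | h | h
    · simp only [if_pos h, min_eq_left (le_of_lt h)]
    · rw [h]; simp
    · simp only [if_neg (not_lt.mpr (le_of_lt h)), if_neg (ne_of_gt h), min_eq_right (le_of_lt h)]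

lemma pvBest_min (x : Int) (l : List Int) :
    PySem.List.min? (x :: l) (fun y => y) = some (pvBest x l).1 := by
  rw [PySem.List.min?_id_cons, pvBest_fst_foldl]

lemma pvBest_isMin (x : Int) (l : List Int) : ∀ z ∈ x :: l, (pvBest x l).1 ≤ z := by
  intro z hz
  have := PySem.List.min?_isMin (pvBest_min x l) z hz
  simpa using this

lemma pvBest_index : ∀ (l : List Int) (x : Int),
    PySem.List.index? (x :: l) (pvBest x l).1 = some (pvBest x l).2.1 := by
  intro l
  induction l with
  | nil => intro x; simp [pvBest, PySem.List.index?_cons_self]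
  | cons y t ih =>
    intro x
    simp only [pvBest]
    rcases lt_trichotomy x (pvBest y t).1 with h | h | h
    · simp only [if_pos h]; exact PySem.List.index?_cons_self _ _
    · simp only [if_neg (not_lt.mpr (le_of_eq h.symm)), if_pos h]
      exact PySem.List.index?_cons_self _ _
    · simp only [if_neg (not_lt.mpr (le_of_lt h)), if_neg (ne_of_gt h)]
      rw [PySem.List.index?_cons_of_ne _ (ne_of_gt h), ih y]
      rfl

lemma pvBest_count : ∀ (l : List Int) (x : Int),
    List.count (pvBest x l).1 (x :: l) = (pvBest x l).2.2 := by
  intro l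
  induction l with
  | nil => intro x; simp [pvBest]
  | cons y t ih =>
    intro x
    simp only [pvBest]
    rcases lt_trichotomy x (pvBest y t).1 with h | h | h
    · simp only [if_pos h]
      have hnot : x ∉ y :: t := by
        intro hm
        exact absurd (pvBest_isMin y t x hm) (not_le.mpr h)
      simp [List.count_cons_self, List.count_eq_zero.mpr hnot]
    · simp only [if_neg (not_lt.mpr (le_of_eq h.symm)), if_pos h]
      rw [List.count_cons_self]
      have hy := ih y
      rw [← h] at hy
      rw [hy]
    · simp only [if_neg (not_lt.mpr (le_of_lt h)), if_neg (ne_of_gt h)]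
      rw [List.count_cons_of_ne (ne_of_gt h), ih y]


lemma pvRow_fold : ∀ (t : List Int) (y mn idx cnt k : Int),
    (y :: t).foldl pvRowStep ((mn, idx, cnt), k) =
      ((if (pvBest y t).1 < mn then ((pvBest y t).1, k + ((pvBest y t).2.1 : Int), ((pvBest y t).2.2 : Int))
        else if (pvBest y t).1 = mn then (mn, idx, cnt + ((pvBest y t).2.2 : Int))
        else (mn, idx, cnt)), k + 1 + t.length) := by
  intro t
  induction t with
  | nil =>
    intro y mn idx cnt k
    simp [pvRowStep, pvBest]
    split_ifs <;> simp_all <;> omega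
  | cons z t' ih =>
    intro y mn idx cnt k
    rw [List.foldl_cons]
    simp only [pvRowStep, beq_iff_eq, pvBest]
    split_ifs <;> rw [ih] <;> split_ifs <;> simp only [Prod.mk.injEq, List.length_cons, Nat.cast_add, Nat.cast_one, Nat.cast_zero, true_and, and_true] <;> omega

lemma pvRowStat_eq_best (x : Int) (l : List Int) :
    pvRowStat (x :: l) = ((pvBest x l).1, ((pvBest x l).2.1 : Int), ((pvBest x l).2.2 : Int)) := by
  cases l with
  | nil => simp [pvRowStat, pvBest]
  | cons y t =>
    rw [pvRowStat, pvRow_fold]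
    simp only [pvBest]
    rcases lt_trichotomy (pvBest y t).1 x with h | h | h
    · rw [if_pos h, if_neg (by omega), if_neg (by omega)]
      simp [Prod.ext_iff]; omega
    · rw [if_neg (by omega), if_pos h, if_neg (by omega), if_pos h.symm]
      simp [Prod.ext_iff]; omega
    · rw [if_neg (by omega), if_neg (by omega), if_pos h]
      simp [Prod.ext_iff]


lemma pvCombine (a : Int) : ∀ (st : List (Int × Int × Int)) (mr v i : Int), 0 ≤ i →
    st.foldl (pvCombStep a) ((mr, v), i) =
      ((if mr = 0 then
          (match PySem.List.index? (st.map Prod.fst) a with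
           | some n => i + (n : Int) + 1
           | none => 0)
        else mr,
        v + (st.map (fun t => if t.1 = a then t.2.1 * t.2.2 else 0)).sum), i + st.length) := by
  intro st
  induction st with
  | nil => intro mr v i _; simp
  | cons t ts ih =>
    intro mr v i hi
    rw [List.foldl_cons]
    show List.foldl (pvCombStep a) ((if (t.1 == a) = true then
           ((if (mr == 0) = true then i + 1 else mr), v + t.2.1 * t.2.2)
         else (mr, v), i + 1)) ts = _
    by_cases ht : t.1 = a
    · rw [if_pos (beq_iff_eq.mpr ht)]
      by_cases hmr : mr = 0
      · rw [if_pos (beq_iff_eq.mpr hmr)]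
        rw [if_pos hmr]
        rw [ih _ _ _ (by omega)]
        rw [if_neg (by omega), List.map_cons, ← ht, PySem.List.index?_cons_self]
        simp [Prod.ext_iff, ht]
        constructor
        · ring
        · omega
      · rw [if_neg (by simpa using hmr)]
        rw [ih _ _ _ (by omega)]
        rw [if_neg hmr, if_neg hmr]
        simp [Prod.ext_iff, ht]
        constructor
        · ring
        · omega
    · rw [if_neg (by simpa using ht)]
      rw [ih _ _ _ (by omega)]
      rw [List.map_cons, PySem.List.index?_cons_of_ne _ ht]
      by_cases hmr : mr = 0
      · rw [if_pos hmr, if_pos hmr]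
        cases hx : PySem.List.index? (ts.map Prod.fst) a with
        | none => simp [Prod.ext_iff, ht, hx]; omega
        | some n => simp [Prod.ext_iff, ht, hx]; constructor; · omega
                    · omega
      · rw [if_neg hmr, if_neg hmr]
        simp [Prod.ext_iff, ht]
        omega

lemma pvInnerA (a : Int) (l : List Int) (v : Int) :
    l.foldl (fun v j => if j == a then v + (((PySem.List.index? l j).getD 0 : Nat) : Int) else v) v
      = v + (List.count a l : Int) * (((PySem.List.index? l a).getD 0 : Nat) : Int) := by
  rw [PySem.List.foldl_congr_mem l _ (fun v j =>
      if j == a then v + (((PySem.List.index? l a).getD 0 : Nat) : Int) else v) v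
    (by intro acc x hx
        by_cases hxa : x = a
        · rw [hxa]
        · simp [beq_iff_eq, hxa])]
  rw [PySem.List.foldl_if_eq_foldl_filter]
  rw [PySem.List.foldl_add (g := fun _ => (((PySem.List.index? l a).getD 0 : Nat) : Int))]
  rw [PySem.List.sum_map_const_int]
  congr 1
  rw [List.count]
  congr 1
  simp [List.countP_eq_length_filter]

theorem main_eq : ∀ (m : List (List Int)), m ≠ [] → (∀ row ∈ m, row ≠ []) →
    melhor_volta m = melhor_volta_alt m := by
  intro m hne hrows
  unfold melhor_volta melhor_volta_alt
  simp only [PySem.List.foldl_append_singleton_eq_map, List.nil_append]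
  have hfst : (m.map pvRowStat).map Prod.fst
      = m.map (fun i => (PySem.List.min? i (fun x => x)).getD 0) := by
    rw [List.map_map]
    apply List.map_congr_left
    intro row hrow
    cases hr : row with
    | nil => exact absurd hr (hrows row hrow)
    | cons x l =>
      simp only [Function.comp, pvRowStat_eq_best, pvBest_min x l, Option.getD_some]
  rw [hfst]
  -- the global minimum exists
  obtain ⟨a0, ha0⟩ : ∃ a0, PySem.List.min?
      (m.map (fun i => (PySem.List.min? i (fun x => x)).getD 0)) (fun x => x) = some a0 := by
    cases hx : PySem.List.min? (m.map (fun i => (PySem.List.min? i (fun x => x)).getD 0)) (fun x => x) with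
    | none =>
      rw [PySem.List.min?_eq_none_iff] at hx
      exact absurd (List.map_eq_nil_iff.mp hx) hne
    | some a0 => exact ⟨a0, rfl⟩
  rw [ha0]
  simp only [Option.getD_some]
  have hmem : a0 ∈ m.map (fun i => (PySem.List.min? i (fun x => x)).getD 0) :=
    PySem.List.min?_mem ha0
  obtain ⟨n, hn⟩ : ∃ n, PySem.List.index?
      (m.map (fun i => (PySem.List.min? i (fun x => x)).getD 0)) a0 = some n := by
    have := (PySem.List.index?_isSome_iff _ a0).mpr hmem
    exact Option.isSome_iff_exists.mp this
  rw [pvCombine a0 (List.map pvRowStat m) 0 1 0 (le_refl 0), hfst, hn, if_pos rfl]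
  simp only [hn, Option.getD_some]
  refine Prod.ext ?_ (Prod.ext rfl ?_)
  · simp
  · -- value components
    show m.foldl (fun v i =>
        i.foldl (fun v j => if j == a0 then v + (((PySem.List.index? i j).getD 0 : Nat) : Int) else v) v) 1
      = 1 + ((m.map pvRowStat).map (fun t => if t.1 = a0 then t.2.1 * t.2.2 else 0)).sum
    rw [PySem.List.foldl_congr_mem m _
        (fun v i => v + (List.count a0 i : Int) * (((PySem.List.index? i a0).getD 0 : Nat) : Int)) 1
        (by intro acc row hrow; exact pvInnerA a0 row acc)]
    rw [PySem.List.foldl_add]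
    rw [List.map_map]
    congr 1
    apply congrArg
    apply List.map_congr_left
    intro row hrow
    cases hr : row with
    | nil => exact absurd hr (hrows row hrow)
    | cons x l =>
      simp only [Function.comp, pvRowStat_eq_best]
      by_cases hb : (pvBest x l).1 = a0
      · rw [if_pos hb, ← hb, pvBest_count, pvBest_index]
        simp [mul_comm]
      · rw [if_neg hb]
        have hnotin : a0 ∉ x :: l := by
          intro hin
          have h1 := pvBest_isMin x l a0 hin
          have h2 : (pvBest x l).1 ∈ m.map (fun i => (PySem.List.min? i (fun x => x)).getD 0) := by
            refine List.mem_map.mpr ⟨row, hrow, ?_⟩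
            rw [hr, pvBest_min x l, Option.getD_some]
          have h3 := PySem.List.min?_isMin ha0 _ h2
          exact hb (le_antisymm h1 h3)
        rw [List.count_eq_zero.mpr hnotin]
        simp

-- ===== VERDICT (by name: the statement is the Claim_ definition above) =====
theorem melhor_volta_spec : Claim_equal_melhor_volta := by
  intro m _dom hpre
  unfold Spec_melhor_volta
  exact main_eq m hpre.1 hpre.2
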